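-- pv_equiv track=rewrite | github.com/UT-Computational-NE/neutron-os-core | tools/agents/chat/fullscreen.py | _style_help_hint
-- ===== SOURCE A (Python) =====
-- def _style_help_hint(line: str) -> list[tuple[str, str]]:
--     parts: list[tuple[str, str]] = []
--     pos = 0
--     for cmd in ("/help", "/exit"):
--         idx = line.find(cmd, pos)
--         if idx >= 0:
--             if idx > pos:
--                 parts.append(("class:dim", line[pos:idx]))
--             parts.append(("class:slash-cmd", cmd))
--             pos = idx + len(cmd)
--     if pos < len(line):
--         parts.append(("class:dim", line[pos:]))
--     return parts if parts else [("class:dim", line)]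
-- ===== SOURCE B (Python) =====
-- def _style_help_hint(line: str) -> list[tuple[str, str]]:
--     # Recursive decomposition: partition the line at the first command, style the
--     # pieces, and recurse on the tail with the remaining commands.
--     def segments(text: str, cmds: tuple[str, ...]) -> list[tuple[str, str]]:
--         if not cmds:
--             return [("class:dim", text)] if text else []
--         head, sep, tail = text.partition(cmds[0])
--         if not sep:
--             return segments(text, cmds[1:])
--         return ([("class:dim", head)] if head else []) \
--             + [("class:slash-cmd", sep)] + segments(tail, cmds[1:])
--
--     return segments(line, ("/help", "/exit")) or [("class:dim", line)]
-- ===== Notes on version B (the rewrite author's own statement) =====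
-- stated objective: alternative
-- what changed: A scans with an explicit running position and find, interleaving search and rendering in one loop with a post-hoc empty fallback; B is a recursive decomposition that partitions the text at the first command, styles the head/match pieces, and recurses on the remaining tail with the remaining commands.
import Mathlib
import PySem

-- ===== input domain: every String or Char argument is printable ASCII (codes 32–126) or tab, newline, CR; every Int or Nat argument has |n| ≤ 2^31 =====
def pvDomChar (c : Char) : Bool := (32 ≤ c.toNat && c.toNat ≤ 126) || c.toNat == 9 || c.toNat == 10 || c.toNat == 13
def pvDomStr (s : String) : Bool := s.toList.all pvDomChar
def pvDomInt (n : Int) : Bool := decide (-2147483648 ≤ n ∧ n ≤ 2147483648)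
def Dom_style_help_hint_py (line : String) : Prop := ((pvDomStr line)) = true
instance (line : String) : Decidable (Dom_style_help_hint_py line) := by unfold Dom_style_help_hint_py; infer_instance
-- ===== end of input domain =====

-- B replaces A's position-tracking search loop by a recursive partition-based
-- decomposition (split the line at the first command, recurse on the tail); same cost.

-- ===== PORT A =====
-- A's loop body: find the command from the running position, emit the dim gap and
-- the styled command, advance the position.
def pvStepA (line : String) (st : List (String × String) × Int) (cmd : String) :
    List (String × String) × Int :=
  let idx := PySem.Str.findFrom line cmd st.2
  if 0 ≤ idx then
    ((st.1 ++ (if st.2 < idx then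
          [("class:dim", PySem.Str.slice line (some st.2) (some idx))] else []))
      ++ [("class:slash-cmd", cmd)],
     idx + PySem.Str.len cmd)
  else st

def style_help_hint_py (line : String) : List (String × String) :=
  let st := ["/help", "/exit"].foldl (pvStepA line) ([], 0)
  let parts :=
    if st.2 < PySem.Str.len line then
      st.1 ++ [("class:dim", PySem.Str.slice line (some st.2) none)]
    else st.1
  if parts ≠ [] then parts else [("class:dim", line)]

-- ===== PORT B =====
-- Source B's recursive helper `segments`. `text.partition(cmd)` is hand-ported (exact: Python's
-- partition splits at the FIRST occurrence, which Str.find locates; `if not sep` with the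
-- nonempty commands used here is exactly `find = -1`, and head/tail are text[:i] / text[i+len(cmd):]).
def pvSegments : String → List String → List (String × String)
  | text, [] => if PySem.Str.len text > 0 then [("class:dim", text)] else []
  | text, cmd :: rest =>
    let i := PySem.Str.find text cmd
    if i = -1 then pvSegments text rest
    else
      let head := PySem.Str.slice text none (some i)
      let tail := PySem.Str.slice text (some (i + PySem.Str.len cmd)) none
      (if PySem.Str.len head > 0 then [("class:dim", head)] else [])
        ++ [("class:slash-cmd", cmd)] ++ pvSegments tail rest

def style_help_hint_py_alt (line : String) : List (String × String) :=
  let segs := pvSegments line ["/help", "/exit"]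
  if segs = [] then [("class:dim", line)] else segs

-- ===== PRECONDITION & SPEC =====
def Spec_style_help_hint_py (line : String) (out : List (String × String)) : Prop := out = style_help_hint_py_alt line
instance (line : String) (out : List (String × String)) : Decidable (Spec_style_help_hint_py line out) := by unfold Spec_style_help_hint_py; infer_instance

-- ===== CLAIM (what is proved, stated in full; the proofs are below) =====
def Claim_equal_style_help_hint_py : Prop := ∀ (line : String), Dom_style_help_hint_py line → Spec_style_help_hint_py line (style_help_hint_py line)

-- ===== LEMMAS AND PROOFS =====
-- A's trailing-remainder step, factored out for the invariant.
def pvFinish (line : String) (st : List (String × String) × Int) : List (String × String) :=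
  if st.2 < PySem.Str.len line then
    st.1 ++ [("class:dim", PySem.Str.slice line (some st.2) none)]
  else st.1

-- Invariant: A's fold from position k, finished with the trailing dim segment,
-- is the accumulator followed by B's recursive segmentation of the suffix line[k:].
theorem pvMain (line : String) (cmds : List String) (acc : List (String × String))
    (k : Nat) (hk : k ≤ line.toList.length) :
    pvFinish line (cmds.foldl (pvStepA line) (acc, (k : Int)))
      = acc ++ pvSegments (PySem.Str.slice line (some (k : Int)) none) cmds := by
  have hLL : line.toList.length = line.length := by simp
  induction cmds generalizing acc k with
  | nil =>
    simp only [List.foldl, pvFinish, pvSegments]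
    have hlen : PySem.Str.len (PySem.Str.slice line (some (k : Int)) none)
        = ((line.toList.length - k : Nat) : Int) := by
      simp [PySem.Str.len_eq, PySem.Str.toList_slice, PySem.List.slice_from_natCast, hLL]
    rw [hlen, PySem.Str.len_eq]
    split_ifs with h1 h2 h3 <;> first | rfl | (exact (List.append_nil acc).symm) | (exfalso; omega)
  | cons cmd rest ih =>
    have hCC : cmd.toList.length = cmd.length := by simp
    simp only [List.foldl, pvSegments]
    have hfind : PySem.Str.find (PySem.Str.slice line (some (k : Int)) none) cmd
        = PySem.Chars.find (line.toList.drop k) cmd.toList := by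
      simp [PySem.Str.find, PySem.Str.toList_slice, PySem.List.slice_from_natCast]
    set f := PySem.Chars.find (line.toList.drop k) cmd.toList with hf
    have hstep : PySem.Str.findFrom line cmd (k : Int)
        = if f = -1 then -1 else (k : Int) + f := by
      simp only [PySem.Str.findFrom_eq,
        PySem.Chars.findFrom_natCast line.toList cmd.toList k hk]
      rw [← hf]
    by_cases hneg : f = -1
    · have ha : pvStepA line (acc, (k : Int)) cmd = (acc, (k : Int)) := by
        simp only [pvStepA]
        rw [hstep, if_pos hneg]
        norm_num
      rw [ha, hfind, hneg, if_pos rfl]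
      exact ih acc k hk
    · have hf0 : 0 ≤ f := by
        have := PySem.Chars.neg_one_le_find (line.toList.drop k) cmd.toList
        omega
      obtain ⟨i, hi⟩ : ∃ i : Nat, f = (i : Int) := ⟨f.toNat, (Int.toNat_of_nonneg hf0).symm⟩
      have hile : i ≤ line.toList.length - k := by
        have := PySem.Chars.find_le_length (line.toList.drop k) cmd.toList
        simp only [List.length_drop] at this
        rw [← hf, hi] at this
        omega
      have hpre := (PySem.Chars.find_spec (sub := cmd.toList) hf0).1
      have hclen : cmd.toList.length ≤ line.toList.length - k - i := by
        have h1 := hpre.length_le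
        rw [← hf, hi] at h1
        simp only [List.length_drop, Int.toNat_natCast] at h1
        omega
      set k' : Nat := k + i + cmd.toList.length with hk'
      have hk'le : k' ≤ line.toList.length := by omega
      -- A's step
      have ha : pvStepA line (acc, (k : Int)) cmd
          = ((acc ++ (if (k : Int) < (k : Int) + f then
                [("class:dim", PySem.Str.slice line (some (k : Int)) (some ((k : Int) + f)))] else []))
              ++ [("class:slash-cmd", cmd)], ((k' : Nat) : Int)) := by
        simp only [pvStepA]
        rw [hstep, if_neg hneg, if_pos (show (0:Int) ≤ (k : Int) + f by omega)]
        simp only [Prod.mk.injEq]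
        refine ⟨trivial, ?_⟩
        rw [PySem.Str.len_eq, hi, hk', hCC]
        push_cast
        ring
      -- B's pieces equal A's pieces
      have hhead : PySem.Str.slice (PySem.Str.slice line (some (k : Int)) none) none (some f)
          = PySem.Str.slice line (some (k : Int)) (some ((k : Int) + f)) := by
        apply String.toList_inj.mp
        simp [PySem.Str.toList_slice, hi, PySem.List.slice_from_natCast,
          PySem.List.slice_to_natCast, PySem.List.slice_natCast_add]
      have hheadlen : PySem.Str.len (PySem.Str.slice line (some (k : Int)) (some ((k : Int) + f)))
          = (i : Int) := by
        rw [PySem.Str.len_eq]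
        simp only [PySem.Str.toList_slice, PySem.Chars.slice_eq_listSlice, hi,
          PySem.List.slice_natCast_add, List.length_take, List.length_drop]
        omega
      have htail : PySem.Str.slice (PySem.Str.slice line (some (k : Int)) none)
            (some (f + PySem.Str.len cmd)) none
          = PySem.Str.slice line (some ((k' : Nat) : Int)) none := by
        apply String.toList_inj.mp
        have hc : f + PySem.Str.len cmd = ((i + cmd.toList.length : Nat) : Int) := by
          rw [PySem.Str.len_eq, hi, hCC]; push_cast; ring
        rw [hc]
        simp only [PySem.Str.toList_slice, PySem.Chars.slice_eq_listSlice,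
          PySem.List.slice_from_natCast, List.drop_drop]
        congr 1
        omega
      rw [ha, ih _ k' hk'le, hfind, if_neg hneg, hhead, htail, hheadlen, hi]
      by_cases hz : (0 : Int) < (i : Int)
      · rw [if_pos (by omega), if_pos hz]; simp
      · rw [if_neg (by omega), if_neg hz]; simp

theorem pvSlice_zero (line : String) :
    PySem.Str.slice line (some (0 : Int)) none = line := by
  apply String.toList_inj.mp
  rw [show ((0 : Int)) = ((0 : Nat) : Int) from rfl]
  simp [PySem.Str.toList_slice]

-- ===== VERDICT (by name: the statement is the Claim_ definition above) =====
theorem style_help_hint_py_spec : Claim_equal_style_help_hint_py := by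
  intro line _
  have key := pvMain line ["/help", "/exit"] [] 0 (Nat.zero_le _)
  unfold pvFinish at key
  rw [Nat.cast_zero, List.nil_append, pvSlice_zero] at key
  show style_help_hint_py line = style_help_hint_py_alt line
  simp only [style_help_hint_py, style_help_hint_py_alt]
  rw [key]
  by_cases h : pvSegments line ["/help", "/exit"] = []
  · simp [h]
  · simp [h]
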